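-- pv_equiv track=rewrite | github.com/ffufcok/KIB_Homework | Stack_Machine.py | parse_funcs
-- ===== SOURCE A (Python) =====
-- def parse_funcs(lst):
--     result_dict = dict()
--     last_index = None
--     func_name = None
--     for i in range(len(lst)):
--         if lst[i] == ':':
--             last_index = i
--             func_name = lst[i + 1]
--         elif lst[i] == ';':
--             if lst[i - 1] == 'return':
--                 result_dict[func_name] = ('func', lst[last_index + 2:i])
--             else:
--                 result_dict[func_name] = ('proc', lst[last_index + 2:i])
--
--     return result_dict
-- ===== SOURCE B (Python) =====
-- def parse_funcs(lst):
--     # Phase 1: build an index of boundary positions.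
--     colons = [i for i, t in enumerate(lst) if t == ':']
--     semis = [i for i, t in enumerate(lst) if t == ';']
--     # Phase 2: process each ';' segment against the most recent preceding ':'.
--     result = {}
--     for q in semis:
--         p = max(c for c in colons if c < q)
--         kind = 'func' if lst[q - 1] == 'return' else 'proc'
--         result[lst[p + 1]] = (kind, lst[p + 2:q])
--     return result
-- ===== Notes on version B (the rewrite author's own statement) =====
-- stated objective: alternative
-- what changed: Replaced A's single pass with running last_index/func_name state by a two-phase decomposition: first build an index of ':' and ';' positions, then process each ';' segment by binding it to the greatest preceding ':' position.
import Mathlib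
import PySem

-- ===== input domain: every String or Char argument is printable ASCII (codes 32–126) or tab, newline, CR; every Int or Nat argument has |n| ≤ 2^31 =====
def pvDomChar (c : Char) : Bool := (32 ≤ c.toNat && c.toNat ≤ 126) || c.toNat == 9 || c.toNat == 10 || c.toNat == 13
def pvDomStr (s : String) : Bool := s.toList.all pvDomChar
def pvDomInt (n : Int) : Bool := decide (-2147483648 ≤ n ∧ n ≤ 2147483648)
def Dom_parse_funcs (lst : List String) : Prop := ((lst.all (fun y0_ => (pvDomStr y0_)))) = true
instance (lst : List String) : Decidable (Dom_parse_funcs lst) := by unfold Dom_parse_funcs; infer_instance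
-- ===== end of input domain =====

-- B replaces A's single pass with running state by a two-phase decomposition: first build an
-- index of ':' and ';' positions, then process each ';' segment against its most recent ':'.
-- Objective: alternative decomposition (same asymptotic cost on typical inputs).

-- ===== PORT A =====
-- loop state: (result_dict, last_index, func_name)
def pfA_step (lst : List String)
    (st : PySem.Dict String (String × List String) × Option Int × Option String) (i : Int) :
    PySem.Dict String (String × List String) × Option Int × Option String :=
  if PySem.List.pyGetD lst i "" = ":" then
    -- lst[i+1] raises IndexError when i+1 = len; those inputs are excluded by Pre_
    (st.1, some i, some (PySem.List.pyGetD lst (i + 1) ""))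
  else if PySem.List.pyGetD lst i "" = ";" then
    -- last_index = None raises TypeError here; those inputs are excluded by Pre_
    let li := st.2.1.getD 0
    let body := PySem.List.slice lst (some (li + 2)) (some i)
    let name := st.2.2.getD ""
    if PySem.List.pyGetD lst (i - 1) "" = "return" then
      (st.1.insert name ("func", body), st.2.1, st.2.2)
    else
      (st.1.insert name ("proc", body), st.2.1, st.2.2)
  else st

def parse_funcs (lst : List String) : List (String × String × List String) :=
  ((PySem.List.pyRange 0 lst.length 1).foldl (pfA_step lst)
      (PySem.Dict.empty, none, none)).1.items

-- ===== PORT B =====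
def pfB_colons (lst : List String) : List Int :=
  ((PySem.List.enumerate lst 0).filter (fun p => p.2 == ":")).map (·.1)

def pfB_semis (lst : List String) : List Int :=
  ((PySem.List.enumerate lst 0).filter (fun p => p.2 == ";")).map (·.1)

def pfB_step (lst : List String) (colons : List Int)
    (d : PySem.Dict String (String × List String)) (q : Int) :
    PySem.Dict String (String × List String) :=
  -- max of an empty generator raises ValueError; those inputs are excluded by Pre_
  let p := (PySem.List.max? (colons.filter (fun c => decide (c < q))) (fun x => x)).getD 0
  let kind := if PySem.List.pyGetD lst (q - 1) "" = "return" then "func" else "proc"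
  d.insert (PySem.List.pyGetD lst (p + 1) "") (kind, PySem.List.slice lst (some (p + 2)) (some q))

def parse_funcs_alt (lst : List String) : List (String × String × List String) :=
  ((pfB_semis lst).foldl (pfB_step lst (pfB_colons lst)) PySem.Dict.empty).items

-- ===== PRECONDITION & SPEC =====
-- Pre_ excludes exactly the inputs where A raises: a ':' as the last token (lst[i+1] IndexError)
-- or a ';' with no preceding ':' (lst[None+2:i] TypeError).
def Pre_parse_funcs (lst : List String) : Prop :=
  (∀ i, i < lst.length → lst.getD i "" = ":" → i + 1 < lst.length) ∧
  (∀ i, i < lst.length → lst.getD i "" = ";" → ∃ j, j < i ∧ lst.getD j "" = ":")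

instance (lst : List String) : Decidable (Pre_parse_funcs lst) := by
  unfold Pre_parse_funcs; infer_instance

def pvWitness_parse_funcs : List String := [":", "f", "x", "return", ";", ":", "g", "y", ";"]

def Spec_parse_funcs (lst : List String) (out : List (String × String × List String)) : Prop := out = parse_funcs_alt lst
instance (lst : List String) (out : List (String × String × List String)) : Decidable (Spec_parse_funcs lst out) := by unfold Spec_parse_funcs; infer_instance

-- ===== CLAIM (what is proved, stated in full; the proofs are below) =====
def Claim_equal_parse_funcs : Prop := ∀ (lst : List String), Dom_parse_funcs lst → Pre_parse_funcs lst → Spec_parse_funcs lst (parse_funcs lst)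


-- ===== LEMMAS AND PROOFS =====

lemma mem_colons_iff (lst : List String) (x : Int) :
    x ∈ pfB_colons lst ↔ ∃ k : Nat, k < lst.length ∧ x = (k : Int) ∧ lst.getD k "" = ":" := by
  simp only [pfB_colons, List.mem_map, List.mem_filter, PySem.List.mem_enumerate_iff]
  constructor
  · rintro ⟨⟨i, s⟩, ⟨⟨k, hk, hp⟩, hs⟩, rfl⟩
    cases hp
    exact ⟨k, hk, by simp, by simpa [List.getD_eq_getElem?_getD, List.getElem?_eq_getElem hk] using (by simpa using hs)⟩
  · rintro ⟨k, hk, rfl, hv⟩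
    refine ⟨((k : Int), lst[k]), ⟨⟨k, hk, by simp⟩, ?_⟩, rfl⟩
    simpa [List.getD_eq_getElem?_getD, List.getElem?_eq_getElem hk] using hv

lemma mem_semis_iff (lst : List String) (x : Int) :
    x ∈ pfB_semis lst ↔ ∃ k : Nat, k < lst.length ∧ x = (k : Int) ∧ lst.getD k "" = ";" := by
  simp only [pfB_semis, List.mem_map, List.mem_filter, PySem.List.mem_enumerate_iff]
  constructor
  · rintro ⟨⟨i, s⟩, ⟨⟨k, hk, hp⟩, hs⟩, rfl⟩
    cases hp
    exact ⟨k, hk, by simp, by simpa [List.getD_eq_getElem?_getD, List.getElem?_eq_getElem hk] using (by simpa using hs)⟩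
  · rintro ⟨k, hk, rfl, hv⟩
    refine ⟨((k : Int), lst[k]), ⟨⟨k, hk, by simp⟩, ?_⟩, rfl⟩
    simpa [List.getD_eq_getElem?_getD, List.getElem?_eq_getElem hk] using hv

lemma semis_pairwise (lst : List String) : (pfB_semis lst).Pairwise (· < ·) := by
  unfold pfB_semis
  exact ((PySem.List.pairwise_lt_enumerate lst 0).filter _).map _ (fun _ _ h => h)

lemma max?_id_eq_of_mem_of_le (L : List Int) (a : Int) (ha : a ∈ L) (hle : ∀ x ∈ L, x ≤ a) :
    PySem.List.max? L (fun x => x) = some a := by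
  have hne : L ≠ [] := by rintro rfl; exact absurd ha (by simp)
  obtain ⟨m, hm⟩ : ∃ m, PySem.List.max? L (fun x => x) = some m := by
    cases h : PySem.List.max? L (fun x => x) with
    | none => exact absurd ((PySem.List.max?_eq_none_iff _ _).mp h) hne
    | some m => exact ⟨m, rfl⟩
  have h1 : m ≤ a := hle m (PySem.List.max?_mem hm)
  have h2 : a ≤ m := PySem.List.max?_isMax hm a ha
  rw [hm, le_antisymm h1 h2]

-- a sorted list of boundaries: peeling off the first kept ';'
lemma filter_ge_cons_of_sorted (L : List Int) (a : Int) (hs : L.Pairwise (· < ·)) (ha : a ∈ L) :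
    L.filter (fun q => decide (a ≤ q)) = a :: L.filter (fun q => decide (a + 1 ≤ q)) := by
  induction L with
  | nil => cases ha
  | cons b rest ih =>
    rcases List.mem_cons.mp ha with rfl | hmem
    · have hgt : ∀ x ∈ rest, a < x := fun x hx => (List.pairwise_cons.mp hs).1 x hx
      have hr : rest.filter (fun q => decide (a ≤ q)) = rest.filter (fun q => decide (a + 1 ≤ q)) :=
        List.filter_congr (fun x hx => by have := hgt x hx; simp only [decide_eq_decide]; omega)
      rw [List.filter_cons, List.filter_cons]
      have h1 : decide (a ≤ a) = true := by simp
      have h2 : decide (a + 1 ≤ a) = false := by simp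
      rw [h1, h2, hr]; simp
    · have hlt : b < a := (List.pairwise_cons.mp hs).1 a hmem
      have ih' := ih (List.pairwise_cons.mp hs).2 hmem
      rw [List.filter_cons, List.filter_cons]
      have h1 : decide (a ≤ b) = false := by simp only [decide_eq_false_iff_not]; omega
      have h2 : decide (a + 1 ≤ b) = false := by simp only [decide_eq_false_iff_not]; omega
      rw [h1, h2]; simpa using ih'

-- invariant relating A's running state to B's boundary index, after processing indices < a
def pfInv (lst : List String) (a : Int) (st : Option Int × Option String) : Prop :=
  st.1 = PySem.List.max? ((pfB_colons lst).filter (fun c => decide (c < a))) (fun x => x) ∧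
  ∀ p, st.1 = some p → st.2 = some (PySem.List.pyGetD lst (p + 1) "")

lemma pfMain (lst : List String) (hPre : Pre_parse_funcs lst) :
    ∀ (m a : Nat) (d : PySem.Dict String (String × List String)) (lastO : Option Int) (nameO : Option String),
      a + m = lst.length → pfInv lst (a : Int) (lastO, nameO) →
      ((PySem.List.pyRange (a : Int) (lst.length : Int) 1).foldl (pfA_step lst) (d, lastO, nameO)).1
        = ((pfB_semis lst).filter (fun q => decide ((a : Int) ≤ q))).foldl (pfB_step lst (pfB_colons lst)) d := by
  intro m
  induction m with
  | zero =>
    intro a d lastO nameO hlen _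
    have h1 : PySem.List.pyRange (a : Int) (lst.length : Int) 1 = [] :=
      PySem.List.pyRange_one_eq_nil (by omega)
    have h2 : (pfB_semis lst).filter (fun q => decide ((a : Int) ≤ q)) = [] := by
      apply List.filter_eq_nil_iff.mpr
      intro x hx
      obtain ⟨k, hk, rfl, _⟩ := (mem_semis_iff lst x).mp hx
      simp; omega
    simp [h1, h2]
  | succ m ih =>
    intro a d lastO nameO hlen hinv
    have halt : (a : Int) < (lst.length : Int) := by omega
    rw [PySem.List.pyRange_one_cons halt]
    have hone : ((a : Int) + 1) = ((a + 1 : Nat) : Int) := by push_cast; ring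
    simp only [List.foldl_cons]
    have hget : PySem.List.pyGetD lst (a : Int) "" = lst.getD a "" := by
      simp [PySem.List.pyGetD_natCast]
    by_cases hc : lst.getD a "" = ":"
    · -- colon: state update on A's side, new max on B's side, ';'-filter unchanged
      have hstep : pfA_step lst (d, lastO, nameO) (a : Int)
          = (d, some (a : Int), some (PySem.List.pyGetD lst (((a + 1 : Nat) : Int)) "")) := by
        simp only [pfA_step]
        rw [hget, if_pos hc, hone]
      have hmem : (a : Int) ∈ (pfB_colons lst).filter (fun c => decide (c < ((a : Int) + 1))) := by
        simp only [List.mem_filter]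
        exact ⟨(mem_colons_iff lst _).mpr ⟨a, by omega, rfl, hc⟩, by simp⟩
      have hmax : PySem.List.max? ((pfB_colons lst).filter (fun c => decide (c < ((a : Int) + 1)))) (fun x => x)
          = some (a : Int) := by
        apply max?_id_eq_of_mem_of_le _ _ hmem
        intro x hx
        have := (List.mem_filter.mp hx).2
        simp at this; omega
      have hinv' : pfInv lst ((a + 1 : Nat) : Int)
          (some (a : Int), some (PySem.List.pyGetD lst (((a + 1 : Nat) : Int)) "")) := by
        constructor
        · rw [← hone]; exact hmax.symm
        · intro p hp; cases hp; rfl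
      have hfilt : (pfB_semis lst).filter (fun q => decide ((a : Int) ≤ q))
          = (pfB_semis lst).filter (fun q => decide (((a + 1 : Nat) : Int) ≤ q)) := by
        apply List.filter_congr
        intro x hx
        obtain ⟨k, hk, rfl, hv⟩ := (mem_semis_iff lst x).mp hx
        have hne : k ≠ a := fun h => by rw [h, hc] at hv; exact absurd hv (by decide)
        simp only [decide_eq_decide]; omega
      rw [hstep, hone, ih (a + 1) d _ _ (by omega) hinv', hfilt]
    · by_cases hs : lst.getD a "" = ";"
      · -- semicolon: one segment is emitted on both sides
        obtain ⟨j, hj, hjc⟩ := hPre.2 a (by omega) hs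
        have hjlen : j < lst.length := by omega
        have hjmem : (j : Int) ∈ (pfB_colons lst).filter (fun c => decide (c < (a : Int))) := by
          simp only [List.mem_filter]
          refine ⟨(mem_colons_iff lst _).mpr ⟨j, hjlen, rfl, hjc⟩, by simp; omega⟩
        obtain ⟨p, hp⟩ : ∃ p, lastO = some p := by
          cases h : lastO with
          | none =>
            exfalso
            have h1 := hinv.1; rw [h] at h1
            have h2 := (PySem.List.max?_eq_none_iff _ _).mp h1.symm
            rw [h2] at hjmem; cases hjmem
          | some p => exact ⟨p, rfl⟩
        have hname : nameO = some (PySem.List.pyGetD lst (p + 1) "") := hinv.2 p hp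
        have hpmax : PySem.List.max? ((pfB_colons lst).filter (fun c => decide (c < (a : Int)))) (fun x => x) = some p := by
          rw [← hinv.1, hp]
        have hstep : pfA_step lst (d, lastO, nameO) (a : Int)
            = (pfB_step lst (pfB_colons lst) d (a : Int), lastO, nameO) := by
          simp only [pfA_step, pfB_step]
          rw [hget, if_neg hc, if_pos hs, hp, hname, hpmax]
          split_ifs with h <;> rfl
        have hsemimem : (a : Int) ∈ pfB_semis lst := (mem_semis_iff lst _).mpr ⟨a, by omega, rfl, hs⟩
        have hpeel := filter_ge_cons_of_sorted (pfB_semis lst) (a : Int) (semis_pairwise lst) hsemimem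
        rw [hone] at hpeel
        have hinv' : pfInv lst ((a + 1 : Nat) : Int) (lastO, nameO) := by
          refine ⟨?_, hinv.2⟩
          rw [hinv.1]
          congr 1
          apply List.filter_congr
          intro x hx
          obtain ⟨k, hk, rfl, hv⟩ := (mem_colons_iff lst x).mp hx
          have hne : k ≠ a := fun h => by rw [h] at hv; exact hc hv
          simp only [decide_eq_decide]; omega
        rw [hstep, hone, hpeel, List.foldl_cons, ih (a + 1) _ _ _ (by omega) hinv']
      · -- ordinary token: nothing changes on either side
        have hstep : pfA_step lst (d, lastO, nameO) (a : Int) = (d, lastO, nameO) := by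
          simp only [pfA_step]
          rw [hget, if_neg hc, if_neg hs]
        have hfilt : (pfB_semis lst).filter (fun q => decide ((a : Int) ≤ q))
            = (pfB_semis lst).filter (fun q => decide (((a + 1 : Nat) : Int) ≤ q)) := by
          apply List.filter_congr
          intro x hx
          obtain ⟨k, hk, rfl, hv⟩ := (mem_semis_iff lst x).mp hx
          have hne : k ≠ a := fun h => by rw [h] at hv; exact hs hv
          simp only [decide_eq_decide]; omega
        have hinv' : pfInv lst ((a + 1 : Nat) : Int) (lastO, nameO) := by
          refine ⟨?_, hinv.2⟩
          rw [hinv.1]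
          congr 1
          apply List.filter_congr
          intro x hx
          obtain ⟨k, hk, rfl, hv⟩ := (mem_colons_iff lst x).mp hx
          have hne : k ≠ a := fun h => by rw [h] at hv; exact hc hv
          simp only [decide_eq_decide]; omega
        rw [hstep, hone, ih (a + 1) d _ _ (by omega) hinv', hfilt]

-- ===== VERDICT (by name: the statement is the Claim_ definition above) =====
theorem parse_funcs_spec : Claim_equal_parse_funcs := by
  intro lst _ hPre
  unfold Spec_parse_funcs parse_funcs parse_funcs_alt
  have h0 : pfInv lst (0 : Int) ((none : Option Int), (none : Option String)) := by
    constructor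
    · have : (pfB_colons lst).filter (fun c => decide (c < (0 : Int))) = [] := by
        apply List.filter_eq_nil_iff.mpr
        intro x hx
        obtain ⟨k, hk, rfl, _⟩ := (mem_colons_iff lst x).mp hx
        simp
      rw [this]; rfl
    · intro p hp; cases hp
  have hmain := pfMain lst hPre lst.length 0 PySem.Dict.empty none none (by omega) (by exact_mod_cast h0)
  simp only [Nat.cast_zero] at hmain
  have hall : (pfB_semis lst).filter (fun q => decide ((0 : Int) ≤ q)) = pfB_semis lst := by
    apply List.filter_eq_self.mpr
    intro x hx
    obtain ⟨k, hk, rfl, _⟩ := (mem_semis_iff lst x).mp hx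
    simp
  rw [hall] at hmain
  exact_mod_cast congrArg PySem.Dict.items hmain
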